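-- pv_equiv track=rewrite | github.com/hyejin88/edujini | scripts/build_drill_pools.py | count_borrows
-- ===== SOURCE A (Python) =====
-- def count_borrows(a, b):
--     """뺄셈(a-b, a>=b)에서 받아내림이 일어난 자릿수 개수."""
--     n = 0
--     borrow = 0
--     while a > 0 or b > 0:
--         da = (a % 10) - borrow
--         db = b % 10
--         if da < db:
--             n += 1
--             borrow = 1
--         else:
--             borrow = 0
--         a //= 10
--         b //= 10
--     return n
-- ===== SOURCE B (Python) =====
-- def count_borrows(a, b):
--     """뺄셈(a-b, a>=b)에서 받아내림이 일어난 자릿수 개수."""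
--     # pass 1: w = number of digit positions the larger operand spans
--     w = 0
--     m = a if a > b else b
--     while m > 0:
--         w += 1
--         m //= 10
--     # pass 2: a borrow occurs at position k iff the low (k+1)-digit suffix
--     # of a is smaller than that of b (stateless suffix test, no borrow flag)
--     return sum(1 for k in range(w) if a % 10 ** (k + 1) < b % 10 ** (k + 1))
-- ===== Notes on version B (the rewrite author's own statement) =====
-- stated objective: alternative
-- what changed: Replaces the single stateful digit scan that threads a borrow flag by two staged passes: first compute the digit width of the larger operand, then count positions k with a % 10**(k+1) < b % 10**(k+1) via a stateless comprehension (borrow at digit k iff the low suffix of a is smaller).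
import Mathlib
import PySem

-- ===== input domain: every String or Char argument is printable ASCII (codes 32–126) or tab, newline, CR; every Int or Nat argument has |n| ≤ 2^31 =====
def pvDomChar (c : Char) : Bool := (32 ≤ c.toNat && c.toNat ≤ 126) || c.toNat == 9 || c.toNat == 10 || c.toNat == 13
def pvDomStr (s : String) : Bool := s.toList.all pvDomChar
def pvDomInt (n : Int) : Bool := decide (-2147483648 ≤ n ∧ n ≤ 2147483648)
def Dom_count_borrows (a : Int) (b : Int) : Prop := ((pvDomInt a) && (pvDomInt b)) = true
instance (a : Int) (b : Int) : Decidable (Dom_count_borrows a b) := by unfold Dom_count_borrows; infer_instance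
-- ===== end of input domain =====

-- B replaces A's single stateful scan (borrow flag threaded digit by digit) by two
-- staged passes: a width pass, then a stateless count of positions k with
-- a % 10^(k+1) < b % 10^(k+1); alternative decomposition, same cost.

-- termination fact shared by the loops
theorem pvStep_lt (a b : Int) (h : a > 0 ∨ b > 0) :
    (PySem.Int.floordiv a 10).toNat + (PySem.Int.floordiv b 10).toNat < a.toNat + b.toNat := by
  rw [PySem.Int.floordiv_eq_ediv_of_pos (by norm_num), PySem.Int.floordiv_eq_ediv_of_pos (by norm_num)]
  have hlt : ∀ x : Int, 0 < x → x / 10 < x := by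
    intro x hx; rw [Int.ediv_lt_iff_lt_mul (by norm_num)]; nlinarith
  have hle : ∀ x : Int, x ≤ 0 → x / 10 ≤ 0 := by
    intro x hx
    have := Int.ediv_le_ediv (a := x) (b := 0) (by norm_num : (0:Int) < 10) hx
    simpa using this
  rcases h with h | h
  · rcases le_or_gt b 0 with hb | hb
    · have := hlt a h; have := hle b hb; omega
    · have := hlt a h; have := hlt b hb; omega
  · rcases le_or_gt a 0 with ha | ha
    · have := hlt b h; have := hle a ha; omega
    · have := hlt a ha; have := hlt b h; omega

-- ===== PORT A =====
def pvLoopA (a b borrow n : Int) : Int :=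
  if _h : a > 0 ∨ b > 0 then
    let da := PySem.Int.mod a 10 - borrow
    let db := PySem.Int.mod b 10
    if da < db then
      pvLoopA (PySem.Int.floordiv a 10) (PySem.Int.floordiv b 10) 1 (n + 1)
    else
      pvLoopA (PySem.Int.floordiv a 10) (PySem.Int.floordiv b 10) 0 n
  else n
termination_by a.toNat + b.toNat
decreasing_by all_goals exact pvStep_lt a b _h

def count_borrows (a : Int) (b : Int) : Int := pvLoopA a b 0 0

-- ===== PORT B =====
-- pass 1 of Source B: 'w = 0; m = a if a > b else b; while m > 0: w += 1; m //= 10'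
def pvWidth (m : Int) : Int :=
  if _h : m > 0 then pvWidth (PySem.Int.floordiv m 10) + 1 else 0
termination_by m.toNat
decreasing_by
  have := pvStep_lt m m (Or.inl _h); omega

-- pass 2 of Source B: the stateless suffix count over range(w)
def count_borrows_alt (a : Int) (b : Int) : Int :=
  let w := pvWidth (if a > b then a else b)
  ((PySem.List.pyRange 0 w 1).countP
      (fun k => decide (PySem.Int.mod a ((10:Int) ^ (k + 1).toNat)
                        < PySem.Int.mod b ((10:Int) ^ (k + 1).toNat))) : Nat)

-- ===== PRECONDITION & SPEC =====
def Spec_count_borrows (a : Int) (b : Int) (out : Int) : Prop := out = count_borrows_alt a b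
instance (a : Int) (b : Int) (out : Int) : Decidable (Spec_count_borrows a b out) := by unfold Spec_count_borrows; infer_instance

-- ===== CLAIM (what is proved, stated in full; the proofs are below) =====
def Claim_equal_count_borrows : Prop := ∀ (a : Int) (b : Int), Dom_count_borrows a b → Spec_count_borrows a b (count_borrows a b)

-- ===== LEMMAS AND PROOFS =====

-- digit-split of a suffix: a mod 10^(k+1) = ((a div 10^k) mod 10)·10^k + a mod 10^k
theorem pvSuffixSplit (a : Int) (k : Nat) :
    a % (10 ^ (k + 1) : Int) = (a / (10 ^ k : Int)) % 10 * 10 ^ k + a % (10 ^ k : Int) := by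
  have hdd : a / (10 ^ k : Int) / 10 = a / (10 ^ (k + 1) : Int) := by
    rw [Int.ediv_ediv_of_nonneg (by positivity), pow_succ]
  rw [Int.emod_def a ((10:Int) ^ (k + 1)), Int.emod_def (a / (10 ^ k : Int)) (10:Int),
      Int.emod_def a ((10:Int) ^ k), ← hdd, (by ring : ((10:Int) ^ (k + 1)) = 10 ^ k * 10)]
  ring_nf

-- borrow-condition bridge: (dA - [A_k < B_k]) < dB  ⟺  A_{k+1} < B_{k+1}
theorem pvBorrowIff (a b : Int) (k : Nat) :
    ((a / (10 ^ k : Int)) % 10 - (if a % (10 ^ k : Int) < b % (10 ^ k : Int) then (1:Int) else 0)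
        < (b / (10 ^ k : Int)) % 10)
      ↔ a % (10 ^ (k + 1) : Int) < b % (10 ^ (k + 1) : Int) := by
  have hP : (0:Int) < 10 ^ k := by positivity
  have ha1 : 0 ≤ a % (10 ^ k : Int) := Int.emod_nonneg a (by positivity)
  have ha2 : a % (10 ^ k : Int) < 10 ^ k := Int.emod_lt_of_pos a hP
  have hb1 : 0 ≤ b % (10 ^ k : Int) := Int.emod_nonneg b (by positivity)
  have hb2 : b % (10 ^ k : Int) < 10 ^ k := Int.emod_lt_of_pos b hP
  have hda1 : 0 ≤ (a / (10 ^ k : Int)) % 10 := Int.emod_nonneg _ (by norm_num)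
  have hda2 : (a / (10 ^ k : Int)) % 10 < 10 := Int.emod_lt_of_pos _ (by norm_num)
  have hdb1 : 0 ≤ (b / (10 ^ k : Int)) % 10 := Int.emod_nonneg _ (by norm_num)
  have hdb2 : (b / (10 ^ k : Int)) % 10 < 10 := Int.emod_lt_of_pos _ (by norm_num)
  rw [pvSuffixSplit a k, pvSuffixSplit b k]
  constructor
  · intro h; split_ifs at h with hc
    · nlinarith
    · nlinarith
  · intro h; split_ifs with hc
    · nlinarith
    · nlinarith

-- floor division by 10 commutes with max
theorem pvMaxDiv (x y : Int) : max x y / 10 = max (x / 10) (y / 10) := by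
  rcases le_total x y with h | h
  · rw [max_eq_right h, max_eq_right (Int.ediv_le_ediv (by norm_num) h)]
  · rw [max_eq_left h, max_eq_left (Int.ediv_le_ediv (by norm_num) h)]

-- pvWidth unfolds by one when positive, is 0 when not
theorem pvWidth_pos {m : Int} (h : m > 0) : pvWidth m = pvWidth (m / 10) + 1 := by
  rw [pvWidth, dif_pos h, PySem.Int.floordiv_eq_ediv_of_pos (by norm_num)]

theorem pvWidth_nonpos {m : Int} (h : ¬ m > 0) : pvWidth m = 0 := by
  rw [pvWidth, dif_neg h]

theorem pvWidth_nonneg (m : Int) : 0 ≤ pvWidth m := by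
  by_cases h : m > 0
  · rw [pvWidth_pos h]
    have : (pvWidth (m / 10)) ≥ 0 := pvWidth_nonneg (m / 10)
    omega
  · rw [pvWidth_nonpos h]
termination_by m.toNat
decreasing_by
  have := pvStep_lt m m (Or.inl h)
  rw [PySem.Int.floordiv_eq_ediv_of_pos (by norm_num)] at this
  omega

-- A's loop on the k-th suffix state equals the stateless suffix count over the remaining positions
theorem pvKey (a b : Int) : ∀ (m k : Nat) (n : Int),
    (a / (10 ^ k : Int)).toNat + (b / (10 ^ k : Int)).toNat ≤ m →
    pvLoopA (a / (10 ^ k : Int)) (b / (10 ^ k : Int))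
        (if a % (10 ^ k : Int) < b % (10 ^ k : Int) then 1 else 0) n
      = n + ((List.range' k (pvWidth (max (a / (10 ^ k : Int)) (b / (10 ^ k : Int)))).toNat).countP
              (fun j => decide (a % ((10:Int) ^ (j + 1)) < b % ((10:Int) ^ (j + 1)))) : Nat) := by
  intro m
  induction m with
  | zero =>
    intro k n hm
    have ha : a / (10 ^ k : Int) ≤ 0 := by omega
    have hb : b / (10 ^ k : Int) ≤ 0 := by omega
    rw [pvLoopA, dif_neg (by omega), pvWidth_nonpos (by simp; omega)]
    simp
  | succ m ih =>
    intro k n hm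
    by_cases hc : a / (10 ^ k : Int) > 0 ∨ b / (10 ^ k : Int) > 0
    · have hmax : max (a / (10 ^ k : Int)) (b / (10 ^ k : Int)) > 0 := by
        rcases hc with h | h
        · exact lt_of_lt_of_le h (le_max_left _ _)
        · exact lt_of_lt_of_le h (le_max_right _ _)
      have hdd : ∀ x : Int, x / (10 ^ k : Int) / 10 = x / (10 ^ (k+1) : Int) := by
        intro x; rw [Int.ediv_ediv_of_nonneg (by positivity), pow_succ]
      have hW : (pvWidth (max (a / (10 ^ k : Int)) (b / (10 ^ k : Int)))).toNat
          = (pvWidth (max (a / (10 ^ (k+1) : Int)) (b / (10 ^ (k+1) : Int)))).toNat + 1 := by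
        rw [pvWidth_pos hmax, pvMaxDiv, hdd, hdd]
        have := pvWidth_nonneg (max (a / (10 ^ (k+1) : Int)) (b / (10 ^ (k+1) : Int)))
        omega
      have hmeasure := pvStep_lt (a / (10 ^ k : Int)) (b / (10 ^ k : Int)) hc
      rw [PySem.Int.floordiv_eq_ediv_of_pos (by norm_num),
          PySem.Int.floordiv_eq_ediv_of_pos (by norm_num), hdd, hdd] at hmeasure
      have hrec : (a / (10 ^ (k+1) : Int)).toNat + (b / (10 ^ (k+1) : Int)).toNat ≤ m := by omega
      have hiff := pvBorrowIff a b k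
      rw [pvLoopA, dif_pos hc]
      have hmod10 : ∀ x : Int, PySem.Int.mod x 10 = x % 10 :=
        fun x => PySem.Int.mod_eq_emod_of_pos (by norm_num)
      have hdiv10 : ∀ x : Int, PySem.Int.floordiv x 10 = x / 10 :=
        fun x => PySem.Int.floordiv_eq_ediv_of_pos (by norm_num)
      simp only [hmod10, hdiv10, hdd]
      rw [hW, List.range'_succ, List.countP_cons]
      by_cases hbr : a % (10 ^ (k+1) : Int) < b % (10 ^ (k+1) : Int)
      · rw [if_pos (hiff.mpr hbr)]
        have := ih (k + 1) (n + 1) hrec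
        rw [if_pos hbr] at this
        rw [this]
        simp [hbr]
        omega
      · rw [if_neg (fun h => hbr (hiff.mp h))]
        have := ih (k + 1) n hrec
        rw [if_neg hbr] at this
        rw [this]
        simp [hbr]
    · rw [pvLoopA, dif_neg hc, pvWidth_nonpos (by simp; constructor <;> omega)]
      simp

-- bridge the B port's pyRange count to the Nat-range count of pvKey
theorem pvAltEq (a b : Int) :
    count_borrows_alt a b
      = ((List.range' 0 (pvWidth (max a b)).toNat).countP
          (fun j => decide (a % ((10:Int) ^ (j + 1)) < b % ((10:Int) ^ (j + 1)))) : Nat) := by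
  simp only [count_borrows_alt]
  have hmax : (if a > b then a else b) = max a b := by
    rcases le_or_gt a b with h | h
    · rw [if_neg (by omega), max_eq_right h]
    · rw [if_pos h, max_eq_left (by omega)]
  rw [hmax, PySem.List.pyRange_one, List.countP_map, List.range_eq_range']
  simp only [Int.sub_zero]
  congr 1
  apply List.countP_congr
  intro j hj
  have hj0 : (0:Int) ≤ (j:Int) := by positivity
  have : ((0:Int) + (j:Int) + 1).toNat = j + 1 := by omega
  simp only [Function.comp, this]
  rw [PySem.Int.mod_eq_emod_of_pos (by positivity), PySem.Int.mod_eq_emod_of_pos (by positivity)]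

-- ===== VERDICT (by name: the statement is the Claim_ definition above) =====
theorem count_borrows_spec : Claim_equal_count_borrows := by
  intro a b _
  unfold Spec_count_borrows count_borrows
  rw [pvAltEq]
  have h := pvKey a b (a.toNat + b.toNat) 0 0 (by simp)
  simpa using h
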